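-- pv_equiv track=rewrite | github.com/pypi-data/pypi-mirror-92 | packages/batchtools/batchtools-0.1.0.tar.gz/batchtools-0.1.0/batchtools/submit_subjects.py | find_bids_group
-- ===== SOURCE A (Python) =====
-- def find_bids_group(split_path):
--     group = ""
--     for part in split_path:
--         if (
--             "sub-" in part
--         ):  # this will first occur at 1 level deeper than the group, according to the BIDS spec
--             return group
--         else:
--             group = part  # make this part the candidate for group name
--     raise ValueError("Cannot determine group name!")
-- ===== SOURCE B (Python) =====
-- def find_bids_group(split_path):
--     # Structural recursion on the list, no running accumulator and no indices:
--     # look one element ahead; the head is the answer when its successor matches.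
--     parts = list(split_path)
--     if not parts:
--         raise ValueError("Cannot determine group name!")
--     if "sub-" in parts[0]:
--         return ""
--     rest = parts[1:]
--     if not rest:
--         raise ValueError("Cannot determine group name!")
--     if "sub-" in rest[0]:
--         return parts[0]
--     return find_bids_group(rest)
-- ===== Notes on version B (the rewrite author's own statement) =====
-- stated objective: alternative
-- what changed: Replaces A's iterative loop with a running-candidate accumulator by direct structural recursion on the list with one-element lookahead: no accumulator or index is maintained, the head is returned exactly when its successor contains 'sub-'.
import Mathlib
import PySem

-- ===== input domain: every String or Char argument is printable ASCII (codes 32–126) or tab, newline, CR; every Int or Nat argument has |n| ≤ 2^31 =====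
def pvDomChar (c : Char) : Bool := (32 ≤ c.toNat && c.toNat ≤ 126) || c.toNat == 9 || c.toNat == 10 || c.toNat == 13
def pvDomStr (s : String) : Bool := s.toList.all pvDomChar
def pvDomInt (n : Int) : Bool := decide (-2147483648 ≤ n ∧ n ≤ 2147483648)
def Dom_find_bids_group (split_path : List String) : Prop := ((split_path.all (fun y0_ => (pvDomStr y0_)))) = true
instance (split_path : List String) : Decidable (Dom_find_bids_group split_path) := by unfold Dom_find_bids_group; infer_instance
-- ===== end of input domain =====

-- B replaces A's accumulator loop by structural recursion with one-element lookahead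
-- (objective: alternative decomposition, same cost).

-- ===== PORT A =====
-- A's loop with the running candidate `group`; the final `raise ValueError` case
-- (no part contains "sub-") is outside Pre_ and returns "" here.
def find_bids_group_loop (split_path : List String) (group : String) : String :=
  match split_path with
  | [] => ""  -- Python: raise ValueError("Cannot determine group name!"), excluded by Pre_
  | part :: rest =>
    if PySem.Str.isIn "sub-" part then group
    else find_bids_group_loop rest part

def find_bids_group (split_path : List String) : String :=
  find_bids_group_loop split_path ""

-- ===== PORT B =====
-- Source B: structural recursion, one-element lookahead; both `raise ValueError` cases
-- (empty list / no part contains "sub-") are outside Pre_ and return "" here.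
def find_bids_group_alt (split_path : List String) : String :=
  match split_path with
  | [] => ""  -- Python: raise ValueError("Cannot determine group name!"), excluded by Pre_
  | p :: rest =>
    if PySem.Str.isIn "sub-" p then ""
    else
      match rest with
      | [] => ""  -- Python: raise ValueError("Cannot determine group name!"), excluded by Pre_
      | q :: _ => if PySem.Str.isIn "sub-" q then p else find_bids_group_alt rest

-- ===== PRECONDITION & SPEC =====
-- A (and B) raise ValueError exactly when no element contains "sub-"; those inputs are excluded.
def Pre_find_bids_group (split_path : List String) : Prop :=
  (split_path.any (fun p => PySem.Str.isIn "sub-" p)) = true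
instance (split_path : List String) : Decidable (Pre_find_bids_group split_path) := by
  unfold Pre_find_bids_group; infer_instance

def pvWitness_find_bids_group : List String := (["grp", "sub-01"])

def Spec_find_bids_group (split_path : List String) (out : String) : Prop := out = find_bids_group_alt split_path
instance (split_path : List String) (out : String) : Decidable (Spec_find_bids_group split_path out) := by unfold Spec_find_bids_group; infer_instance

-- ===== CLAIM =====
def Claim_equal_find_bids_group : Prop := ∀ (split_path : List String), Dom_find_bids_group split_path → Pre_find_bids_group split_path → Spec_find_bids_group split_path (find_bids_group split_path)

-- ===== LEMMAS AND PROOFS =====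

-- A's loop started after a non-matching head p computes B's recursion on p :: rest.
theorem loop_eq_alt (rest : List String) (p : String)
    (hp : PySem.Chars.isIn ['s', 'u', 'b', '-'] p.toList = false) :
    find_bids_group_loop rest p = find_bids_group_alt (p :: rest) := by
  induction rest generalizing p with
  | nil => simp [find_bids_group_loop, find_bids_group_alt, PySem.Str.isIn, hp]
  | cons q r ih =>
    by_cases hq : PySem.Chars.isIn ['s', 'u', 'b', '-'] q.toList = true
    · simp [find_bids_group_loop, find_bids_group_alt, PySem.Str.isIn, hp, hq]
    · have hq' : PySem.Chars.isIn ['s', 'u', 'b', '-'] q.toList = false := by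
        revert hq; simp
      have := ih q hq'
      simp only [find_bids_group_loop, find_bids_group_alt, PySem.Str.isIn] at this ⊢
      simp [hp, hq', this]

-- ===== VERDICT =====
theorem find_bids_group_spec : Claim_equal_find_bids_group := by
  intro split_path _ _
  unfold Spec_find_bids_group find_bids_group
  cases split_path with
  | nil => rfl
  | cons p rest =>
    by_cases hp : PySem.Chars.isIn ['s', 'u', 'b', '-'] p.toList = true
    · simp [find_bids_group_loop, find_bids_group_alt, PySem.Str.isIn, hp]
    · have hp' : PySem.Chars.isIn ['s', 'u', 'b', '-'] p.toList = false := by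
        revert hp; simp
      rw [show find_bids_group_loop (p :: rest) "" = find_bids_group_loop rest p by
        simp [find_bids_group_loop, PySem.Str.isIn, hp']]
      exact loop_eq_alt rest p hp'
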